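-- pv_equiv track=rewrite | github.com/Wenyueh/bert_joint | nq_eval.py | span_set_equal
-- ===== SOURCE A (Python) =====
-- def is_null_span(span):
--     if span[0] == -1 and span[1] == -1:
--         return True
--     else:
--         return False
--
-- def span_set_equal(gold_span_list, pred_span_list):
--
--     gold_span_list = [span for span in gold_span_list if not is_null_span(span)]
--     pred_span_list = [span for span in pred_span_list if not is_null_span(span)]
--
--     for pspan in pred_span_list:
--         if not any([pspan == gspan for gspan in gold_span_list]):
--             return False
--
--     for gspan in gold_span_list:
--         if not any([pspan == gspan for pspan in pred_span_list]):
--             return False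
--
--     return True
-- ===== SOURCE B (Python) =====
-- def is_null_span(span):
--     return span[0] == -1 and span[1] == -1
--
-- def span_set_equal(gold_span_list, pred_span_list):
--     def canon(spans):
--         # filter nulls, dedup (first occurrence), sort canonically
--         return sorted(dict.fromkeys(tuple(s) for s in spans if not is_null_span(s)))
--     return canon(gold_span_list) == canon(pred_span_list)
-- ===== Notes on version B (the rewrite author's own statement) =====
-- stated objective: faster
-- what changed: Replaces the two nested mutual-membership scans by canonicalising each side (filter nulls, dedup, sort) and comparing the two canonical sequences once.
import Mathlib
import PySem

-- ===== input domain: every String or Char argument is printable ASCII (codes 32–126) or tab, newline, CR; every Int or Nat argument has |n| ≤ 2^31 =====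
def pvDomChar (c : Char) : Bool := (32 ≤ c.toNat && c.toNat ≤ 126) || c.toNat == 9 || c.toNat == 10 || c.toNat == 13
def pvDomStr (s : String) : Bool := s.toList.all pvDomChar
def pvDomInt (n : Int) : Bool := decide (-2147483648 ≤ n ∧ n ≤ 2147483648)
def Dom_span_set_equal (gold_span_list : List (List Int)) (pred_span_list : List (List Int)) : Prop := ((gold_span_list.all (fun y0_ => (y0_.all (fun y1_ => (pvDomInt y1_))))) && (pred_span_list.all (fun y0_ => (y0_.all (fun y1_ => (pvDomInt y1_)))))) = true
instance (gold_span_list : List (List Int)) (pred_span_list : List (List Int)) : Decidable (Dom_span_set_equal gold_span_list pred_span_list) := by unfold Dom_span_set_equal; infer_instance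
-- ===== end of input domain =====

-- B canonicalises each side (filter nulls, dedup, sort) and compares once, instead of A's two nested membership scans.


-- ===== PORT A =====
-- is_null_span; under Pre_ both indexings are in range (Python's short-circuit raise is excluded by Pre_)
def isNullSpan (span : List Int) : Bool :=
  (PySem.List.pyGetD span 0 0 == -1) && (PySem.List.pyGetD span 1 0 == -1)

def span_set_equal (gold_span_list : List (List Int)) (pred_span_list : List (List Int)) : Bool :=
  let gold' := gold_span_list.filter (fun span => !isNullSpan span)
  let pred' := pred_span_list.filter (fun span => !isNullSpan span)
  -- first for-loop: return False on a pred span matching no gold span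
  if pred'.all (fun pspan => gold'.any (fun gspan => pspan == gspan)) then
    -- second for-loop
    if gold'.all (fun gspan => pred'.any (fun pspan => pspan == gspan)) then
      true
    else false
  else false

-- ===== PORT B =====
def canonSpans (spans : List (List Int)) : List (List Int) :=
  PySem.List.sorted (PySem.List.dedup (spans.filter (fun s => !isNullSpan s))) (fun x => x) false

def span_set_equal_alt (gold_span_list : List (List Int)) (pred_span_list : List (List Int)) : Bool :=
  canonSpans gold_span_list == canonSpans pred_span_list

-- ===== PRECONDITION & SPEC =====
-- Pre_ excludes exactly the inputs where A's is_null_span raises IndexError: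
-- a span that is empty, or whose first element is -1 while it has no second element.
def Pre_span_set_equal (gold_span_list : List (List Int)) (pred_span_list : List (List Int)) : Prop :=
  ∀ s ∈ gold_span_list ++ pred_span_list, s ≠ [] ∧ (s.head? = some (-1) → 2 ≤ s.length)
instance (gold_span_list : List (List Int)) (pred_span_list : List (List Int)) : Decidable (Pre_span_set_equal gold_span_list pred_span_list) := by unfold Pre_span_set_equal; infer_instance

def pvWitness_span_set_equal : List (List Int) × List (List Int) := ([[0, 3], [-1, -1]], [[0, 3]])

def Spec_span_set_equal (gold_span_list : List (List Int)) (pred_span_list : List (List Int)) (out : Bool) : Prop := out = span_set_equal_alt gold_span_list pred_span_list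
instance (gold_span_list : List (List Int)) (pred_span_list : List (List Int)) (out : Bool) : Decidable (Spec_span_set_equal gold_span_list pred_span_list out) := by unfold Spec_span_set_equal; infer_instance

-- ===== CLAIM (what is proved, stated in full; the proofs are below) =====
def Claim_equal_span_set_equal : Prop := ∀ (gold_span_list : List (List Int)) (pred_span_list : List (List Int)), Dom_span_set_equal gold_span_list pred_span_list → Pre_span_set_equal gold_span_list pred_span_list → Spec_span_set_equal gold_span_list pred_span_list (span_set_equal gold_span_list pred_span_list)

-- ===== LEMMAS AND PROOFS =====

-- the Decidable instance chosen by the B port equals the LinearOrder-derived one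
lemma sorted_inst_bridge (xs : List (List Int)) :
    PySem.List.sorted xs (fun x => x) false
      = @PySem.List.sorted (List Int) (List Int) LinearOrder.toPartialOrder.toLT LinearOrder.toDecidableLT xs (fun x => x) false := by
  have h : (fun (a b : List Int) => a.decidableLT b) = (LinearOrder.toDecidableLT : DecidableLT (List Int)) := by
    funext a b; exact Subsingleton.elim _ _
  show @PySem.List.sorted (List Int) (List Int) List.instLT (fun a b => a.decidableLT b) xs (fun x => x) false = _
  rw [h]

-- A is mutual membership of the filtered lists; B is equality of sorted dedups,
-- i.e. permutation of dedups, i.e. the same membership (dedups are nodup).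
lemma canon_eq_iff (g p : List (List Int)) :
    (canonSpans g = canonSpans p) ↔
      (∀ s, s ∈ g.filter (fun x => !isNullSpan x) ↔ s ∈ p.filter (fun x => !isNullSpan x)) := by
  unfold canonSpans
  rw [sorted_inst_bridge, sorted_inst_bridge,
      PySem.List.sorted_id_eq_sorted_id_iff_perm,
      List.perm_ext_iff_of_nodup (PySem.List.nodup_dedup _) (PySem.List.nodup_dedup _)]
  simp

-- ===== VERDICT (by name: the statement is the Claim_ definition above) =====
theorem span_set_equal_spec : Claim_equal_span_set_equal := by
  intro g p _ _
  show span_set_equal g p = span_set_equal_alt g p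
  simp only [span_set_equal, span_set_equal_alt]
  split_ifs with h1 h2
  · symm
    rw [beq_iff_eq, canon_eq_iff g p]
    simp only [List.all_eq_true, List.any_eq_true, beq_iff_eq] at h1 h2
    intro s
    constructor
    · intro hs
      obtain ⟨t, ht, he⟩ := h2 s hs
      exact he ▸ ht
    · intro hs
      obtain ⟨t, ht, he⟩ := h1 s hs
      exact he ▸ ht
  · symm
    rw [beq_eq_false_iff_ne, ne_eq, canon_eq_iff g p]
    intro hall
    apply h2
    simp only [List.all_eq_true, List.any_eq_true, beq_iff_eq]
    intro s hs
    exact ⟨s, (hall s).mp hs, rfl⟩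
  · symm
    rw [beq_eq_false_iff_ne, ne_eq, canon_eq_iff g p]
    intro hall
    apply h1
    simp only [List.all_eq_true, List.any_eq_true, beq_iff_eq]
    intro s hs
    exact ⟨s, (hall s).mpr hs, rfl⟩
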